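-- pv_equiv track=rewrite | github.com/UKnowWhoIm/just-another-chessbot | engines/utils/generatePermutations.py | generate_blockers
-- ===== SOURCE A (Python) =====
-- def generate_blockers(origin, directions):
--     moves = []
--
--     for [direction_x, direction_y] in directions:
--         move = [ origin // 8 + direction_x, origin % 8 + direction_y ]
--         new_moves = []
--         while move[0] >= 0 and move[0] <= 7 and move[1] >= 0 and move[1] <= 7:
--             new_moves.append(move[0] * 8 + move[1])
--             move = [ move[0] + direction_x, move[1] + direction_y ]
--         if len(new_moves) > 0:
--             new_moves.pop(len(new_moves) - 1)
--
--         moves += new_moves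
--     return moves
-- ===== SOURCE B (Python) =====
-- def generate_blockers(origin, directions):
--     ox, oy = origin // 8, origin % 8
--     moves = []
--     for direction_x, direction_y in directions:
--         x0, y0 = ox + direction_x, oy + direction_y
--         if not (0 <= x0 <= 7 and 0 <= y0 <= 7):
--             continue
--         bounds = []
--         if direction_x > 0:
--             bounds.append((7 - x0) // direction_x + 1)
--         elif direction_x < 0:
--             bounds.append(x0 // (-direction_x) + 1)
--         if direction_y > 0:
--             bounds.append((7 - y0) // direction_y + 1)
--         elif direction_y < 0:
--             bounds.append(y0 // (-direction_y) + 1)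
--         n = min(bounds)
--         for k in range(n - 1):
--             moves.append((x0 + k * direction_x) * 8 + (y0 + k * direction_y))
--     return moves
-- ===== Notes on version B (the rewrite author's own statement) =====
-- stated objective: alternative
-- what changed: B computes, per direction, the number of in-board steps in closed form via floor division to the nearest board edge and emits the blocker squares directly from a range, instead of A's square-by-square walk that appends every square and pops the last one.
import Mathlib
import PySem

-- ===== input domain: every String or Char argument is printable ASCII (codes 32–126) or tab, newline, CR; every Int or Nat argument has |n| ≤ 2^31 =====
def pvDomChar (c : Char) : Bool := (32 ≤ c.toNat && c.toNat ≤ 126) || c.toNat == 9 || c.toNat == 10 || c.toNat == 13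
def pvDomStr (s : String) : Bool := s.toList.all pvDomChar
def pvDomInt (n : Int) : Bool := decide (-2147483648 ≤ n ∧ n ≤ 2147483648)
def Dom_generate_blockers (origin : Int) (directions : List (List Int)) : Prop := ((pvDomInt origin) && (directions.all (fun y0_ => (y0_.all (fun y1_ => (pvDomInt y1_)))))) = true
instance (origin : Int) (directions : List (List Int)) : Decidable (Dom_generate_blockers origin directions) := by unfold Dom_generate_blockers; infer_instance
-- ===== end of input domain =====

-- B replaces A's square-by-square ray walk (append then pop the last) by a closed-form step-count
-- per direction, then emits the blocker squares directly; equivalence is about the return value.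

-- ===== PORT A =====
-- the while loop of A; fuel 64 is an upper bound on the iterations actually taken on Pre_-admitted inputs
def pvWalk (dx dy : Int) : Int → Int → Nat → List Int
  | _, _, 0 => []
  | x, y, fuel + 1 =>
    if 0 ≤ x ∧ x ≤ 7 ∧ 0 ≤ y ∧ y ≤ 7 then
      (x * 8 + y) :: pvWalk dx dy (x + dx) (y + dy) fuel
    else []

def generate_blockers (origin : Int) (directions : List (List Int)) : List Int :=
  directions.foldl (fun moves d =>
    match d with
    | [dx, dy] =>
      let newMoves := pvWalk dx dy (PySem.Int.floordiv origin 8 + dx) (PySem.Int.mod origin 8 + dy) 64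
      moves ++ newMoves.dropLast
    | _ => moves) []

-- ===== PORT B =====
def pvBounds (dx dy x0 y0 : Int) : List Int :=
  (if 0 < dx then [PySem.Int.floordiv (7 - x0) dx + 1]
   else if dx < 0 then [PySem.Int.floordiv x0 (-dx) + 1] else []) ++
  (if 0 < dy then [PySem.Int.floordiv (7 - y0) dy + 1]
   else if dy < 0 then [PySem.Int.floordiv y0 (-dy) + 1] else [])

def pvDirMoves (dx dy x0 y0 : Int) : List Int :=
  if 0 ≤ x0 ∧ x0 ≤ 7 ∧ 0 ≤ y0 ∧ y0 ≤ 7 then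
    match PySem.List.min? (pvBounds dx dy x0 y0) (fun b => b) with
    | some n => (PySem.List.pyRange 0 (n - 1) 1).map (fun k => (x0 + k * dx) * 8 + (y0 + k * dy))
    | none => []
  else []

def generate_blockers_alt (origin : Int) (directions : List (List Int)) : List Int :=
  let ox := PySem.Int.floordiv origin 8
  let oy := PySem.Int.mod origin 8
  directions.foldl (fun moves d =>
    match d with
    | [] => moves
    | [_] => moves
    | dx :: dy :: rest => if rest = [] then moves ++ pvDirMoves dx dy (ox + dx) (oy + dy) else moves) []

-- ===== PRECONDITION & SPEC =====
-- Pre_ excludes inputs where Python A never returns: a direction list whose length is not 2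
-- (unpacking raises ValueError), and the direction [0,0] with 0 ≤ origin ≤ 63 (A loops forever).
def Pre_generate_blockers (origin : Int) (directions : List (List Int)) : Prop :=
  (∀ d ∈ directions, d.length = 2) ∧ (0 ≤ origin → origin ≤ 63 → [(0 : Int), 0] ∉ directions)

instance (origin : Int) (directions : List (List Int)) : Decidable (Pre_generate_blockers origin directions) := by
  unfold Pre_generate_blockers; infer_instance

def pvWitness_generate_blockers : Int × List (List Int) := (28, [[1, 0], [-1, -1], [0, 2]])

def Spec_generate_blockers (origin : Int) (directions : List (List Int)) (out : List Int) : Prop := out = generate_blockers_alt origin directions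
instance (origin : Int) (directions : List (List Int)) (out : List Int) : Decidable (Spec_generate_blockers origin directions out) := by unfold Spec_generate_blockers; infer_instance

-- ===== CLAIM (what is proved, stated in full; the proofs are below) =====
def Claim_equal_generate_blockers : Prop := ∀ (origin : Int) (directions : List (List Int)), Dom_generate_blockers origin directions → Pre_generate_blockers origin directions → Spec_generate_blockers origin directions (generate_blockers origin directions)

-- ===== LEMMAS AND PROOFS =====

-- per-axis facts about the closed-form bounds
theorem pv_ax_pos_in (d p k : Int) (hd : 0 < d) (hp0 : 0 ≤ p) (hp7 : p ≤ 7)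
    (hk : 0 ≤ k) (hkb : k < PySem.Int.floordiv (7 - p) d + 1) :
    0 ≤ p + k * d ∧ p + k * d ≤ 7 := by
  have h1 : k ≤ PySem.Int.floordiv (7 - p) d := by omega
  rw [PySem.Int.le_floordiv_iff_mul_le hd] at h1
  constructor
  · nlinarith
  · nlinarith

theorem pv_ax_pos_out (d p : Int) (hd : 0 < d) :
    7 < p + (PySem.Int.floordiv (7 - p) d + 1) * d := by
  have h : PySem.Int.floordiv (7 - p) d < PySem.Int.floordiv (7 - p) d + 1 := by omega
  rw [PySem.Int.floordiv_lt_iff_lt_mul hd] at h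
  nlinarith

theorem pv_ax_pos_ge1 (d p : Int) (hd : 0 < d) (hp7 : p ≤ 7) :
    1 ≤ PySem.Int.floordiv (7 - p) d + 1 := by
  have h : (0 : Int) ≤ PySem.Int.floordiv (7 - p) d := by
    rw [PySem.Int.le_floordiv_iff_mul_le hd]; nlinarith
  omega

theorem pv_ax_pos_le8 (d p : Int) (hd : 0 < d) (hp0 : 0 ≤ p) :
    PySem.Int.floordiv (7 - p) d + 1 ≤ 8 := by
  have h : PySem.Int.floordiv (7 - p) d < 8 := by
    rw [PySem.Int.floordiv_lt_iff_lt_mul hd]; nlinarith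
  omega

theorem pv_ax_neg_in (d p k : Int) (hd : d < 0) (hp0 : 0 ≤ p) (hp7 : p ≤ 7)
    (hk : 0 ≤ k) (hkb : k < PySem.Int.floordiv p (-d) + 1) :
    0 ≤ p + k * d ∧ p + k * d ≤ 7 := by
  have hd' : 0 < -d := by omega
  have h1 : k ≤ PySem.Int.floordiv p (-d) := by omega
  rw [PySem.Int.le_floordiv_iff_mul_le hd'] at h1
  constructor
  · nlinarith
  · nlinarith

theorem pv_ax_neg_out (d p : Int) (hd : d < 0) :
    p + (PySem.Int.floordiv p (-d) + 1) * d < 0 := by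
  have hd' : 0 < -d := by omega
  have h : PySem.Int.floordiv p (-d) < PySem.Int.floordiv p (-d) + 1 := by omega
  rw [PySem.Int.floordiv_lt_iff_lt_mul hd'] at h
  nlinarith

theorem pv_ax_neg_ge1 (d p : Int) (hd : d < 0) (hp0 : 0 ≤ p) :
    1 ≤ PySem.Int.floordiv p (-d) + 1 := by
  have hd' : 0 < -d := by omega
  have h : (0 : Int) ≤ PySem.Int.floordiv p (-d) := by
    rw [PySem.Int.le_floordiv_iff_mul_le hd']; nlinarith
  omega

theorem pv_ax_neg_le8 (d p : Int) (hd : d < 0) (hp7 : p ≤ 7) :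
    PySem.Int.floordiv p (-d) + 1 ≤ 8 := by
  have hd' : 0 < -d := by omega
  have h : PySem.Int.floordiv p (-d) < 8 := by
    rw [PySem.Int.floordiv_lt_iff_lt_mul hd']; nlinarith
  omega

theorem pv_bounds_ne_nil (dx dy x0 y0 : Int) (hne : ¬(dx = 0 ∧ dy = 0)) :
    pvBounds dx dy x0 y0 ≠ [] := by
  unfold pvBounds
  split_ifs with h1 h2 h3 h4 h5 h6 <;> simp_all <;> omega

theorem pv_bounds_ge1 (dx dy x0 y0 : Int) (hin : 0 ≤ x0 ∧ x0 ≤ 7 ∧ 0 ≤ y0 ∧ y0 ≤ 7) :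
    ∀ b ∈ pvBounds dx dy x0 y0, 1 ≤ b := by
  intro b hb
  unfold pvBounds at hb
  obtain ⟨h1, h2, h3, h4⟩ := hin
  rcases List.mem_append.mp hb with h | h
  · by_cases hp : 0 < dx
    · rw [if_pos hp, List.mem_singleton] at h; subst h; exact pv_ax_pos_ge1 _ _ hp h2
    · by_cases hn : dx < 0
      · rw [if_neg hp, if_pos hn, List.mem_singleton] at h; subst h; exact pv_ax_neg_ge1 _ _ hn h1
      · rw [if_neg hp, if_neg hn] at h; exact absurd h (List.not_mem_nil)
  · by_cases hp : 0 < dy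
    · rw [if_pos hp, List.mem_singleton] at h; subst h; exact pv_ax_pos_ge1 _ _ hp h4
    · by_cases hn : dy < 0
      · rw [if_neg hp, if_pos hn, List.mem_singleton] at h; subst h; exact pv_ax_neg_ge1 _ _ hn h3
      · rw [if_neg hp, if_neg hn] at h; exact absurd h (List.not_mem_nil)
theorem pv_bounds_le8 (dx dy x0 y0 : Int) (hin : 0 ≤ x0 ∧ x0 ≤ 7 ∧ 0 ≤ y0 ∧ y0 ≤ 7) :
    ∀ b ∈ pvBounds dx dy x0 y0, b ≤ 8 := by
  intro b hb
  unfold pvBounds at hb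
  obtain ⟨h1, h2, h3, h4⟩ := hin
  rcases List.mem_append.mp hb with h | h
  · by_cases hp : 0 < dx
    · rw [if_pos hp, List.mem_singleton] at h; subst h; exact pv_ax_pos_le8 _ _ hp h1
    · by_cases hn : dx < 0
      · rw [if_neg hp, if_pos hn, List.mem_singleton] at h; subst h; exact pv_ax_neg_le8 _ _ hn h2
      · rw [if_neg hp, if_neg hn] at h; exact absurd h (List.not_mem_nil)
  · by_cases hp : 0 < dy
    · rw [if_pos hp, List.mem_singleton] at h; subst h; exact pv_ax_pos_le8 _ _ hp h3
    · by_cases hn : dy < 0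
      · rw [if_neg hp, if_pos hn, List.mem_singleton] at h; subst h; exact pv_ax_neg_le8 _ _ hn h4
      · rw [if_neg hp, if_neg hn] at h; exact absurd h (List.not_mem_nil)
theorem pv_bounds_good (dx dy x0 y0 k : Int) (hin : 0 ≤ x0 ∧ x0 ≤ 7 ∧ 0 ≤ y0 ∧ y0 ≤ 7)
    (hk : 0 ≤ k) (h : ∀ b ∈ pvBounds dx dy x0 y0, k < b) :
    0 ≤ x0 + k * dx ∧ x0 + k * dx ≤ 7 ∧ 0 ≤ y0 + k * dy ∧ y0 + k * dy ≤ 7 := by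
  obtain ⟨h1, h2, h3, h4⟩ := hin
  have hx : 0 ≤ x0 + k * dx ∧ x0 + k * dx ≤ 7 := by
    rcases lt_trichotomy dx 0 with hdx | hdx | hdx
    · have hm : PySem.Int.floordiv x0 (-dx) + 1 ∈ pvBounds dx dy x0 y0 := by
        unfold pvBounds; rw [List.mem_append]; left
        split_ifs <;> simp_all <;> omega
      exact pv_ax_neg_in dx x0 k hdx h1 h2 hk (h _ hm)
    · subst hdx; constructor <;> simp <;> omega
    · have hm : PySem.Int.floordiv (7 - x0) dx + 1 ∈ pvBounds dx dy x0 y0 := by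
        unfold pvBounds; rw [List.mem_append]; left
        split_ifs <;> simp_all <;> omega
      exact pv_ax_pos_in dx x0 k hdx h1 h2 hk (h _ hm)
  have hy : 0 ≤ y0 + k * dy ∧ y0 + k * dy ≤ 7 := by
    rcases lt_trichotomy dy 0 with hdy | hdy | hdy
    · have hm : PySem.Int.floordiv y0 (-dy) + 1 ∈ pvBounds dx dy x0 y0 := by
        unfold pvBounds; rw [List.mem_append]; right
        split_ifs <;> simp_all <;> omega
      exact pv_ax_neg_in dy y0 k hdy h3 h4 hk (h _ hm)
    · subst hdy; constructor <;> simp <;> omega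
    · have hm : PySem.Int.floordiv (7 - y0) dy + 1 ∈ pvBounds dx dy x0 y0 := by
        unfold pvBounds; rw [List.mem_append]; right
        split_ifs <;> simp_all <;> omega
      exact pv_ax_pos_in dy y0 k hdy h3 h4 hk (h _ hm)
  exact ⟨hx.1, hx.2, hy.1, hy.2⟩

theorem pv_bounds_bad (dx dy x0 y0 b : Int) (hb : b ∈ pvBounds dx dy x0 y0) :
    ¬(0 ≤ x0 + b * dx ∧ x0 + b * dx ≤ 7 ∧ 0 ≤ y0 + b * dy ∧ y0 + b * dy ≤ 7) := by
  intro hc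
  unfold pvBounds at hb
  rcases List.mem_append.mp hb with h | h
  · by_cases hp : 0 < dx
    · rw [if_pos hp, List.mem_singleton] at h; subst h
      have := pv_ax_pos_out dx x0 hp; omega
    · by_cases hn : dx < 0
      · rw [if_neg hp, if_pos hn, List.mem_singleton] at h; subst h
        have := pv_ax_neg_out dx x0 hn; omega
      · rw [if_neg hp, if_neg hn] at h; exact absurd h (List.not_mem_nil)
  · by_cases hp : 0 < dy
    · rw [if_pos hp, List.mem_singleton] at h; subst h
      have := pv_ax_pos_out dy y0 hp; omega
    · by_cases hn : dy < 0
      · rw [if_neg hp, if_pos hn, List.mem_singleton] at h; subst h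
        have := pv_ax_neg_out dy y0 hn; omega
      · rw [if_neg hp, if_neg hn] at h; exact absurd h (List.not_mem_nil)
theorem pv_walk_eq_range (dx dy : Int) : ∀ (n fuel : Nat) (x y : Int), n ≤ fuel →
    (∀ k : Nat, k < n → (0 ≤ x + (k : Int) * dx ∧ x + (k : Int) * dx ≤ 7 ∧
      0 ≤ y + (k : Int) * dy ∧ y + (k : Int) * dy ≤ 7)) →
    ¬(0 ≤ x + (n : Int) * dx ∧ x + (n : Int) * dx ≤ 7 ∧
      0 ≤ y + (n : Int) * dy ∧ y + (n : Int) * dy ≤ 7) →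
    pvWalk dx dy x y fuel = (List.range n).map (fun (k : Nat) => (x + (k : Int) * dx) * 8 + (y + (k : Int) * dy)) := by
  intro n
  induction n with
  | zero =>
    intro fuel x y _ _ hbad
    simp only [Nat.cast_zero, zero_mul, add_zero] at hbad
    cases fuel with
    | zero => simp [pvWalk]
    | succ f => simp [pvWalk, if_neg hbad]
  | succ m ih =>
    intro fuel x y hfuel hgood hbad
    obtain ⟨f, rfl⟩ : ∃ f, fuel = f + 1 := ⟨fuel - 1, by omega⟩
    have h0 := hgood 0 (by omega)
    simp only [Nat.cast_zero, zero_mul, add_zero] at h0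
    rw [pvWalk, if_pos h0]
    have hnext := ih f (x + dx) (y + dy) (by omega)
      (fun k hk => by
        have := hgood (k + 1) (by omega)
        push_cast at this ⊢
        constructor; · linarith [this.1]
        constructor; · nlinarith [this.2.1]
        constructor; · nlinarith [this.2.2.1]
        · nlinarith [this.2.2.2])
      (by
        push_cast at hbad ⊢
        intro hc
        apply hbad
        constructor; · nlinarith [hc.1]
        constructor; · nlinarith [hc.2.1]
        constructor; · nlinarith [hc.2.2.1]
        · nlinarith [hc.2.2.2])
    rw [hnext, List.range_succ_eq_map, List.map_cons, List.map_map]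
    congr 1
    · push_cast; ring
    · apply List.map_congr_left
      intro k _
      simp [Function.comp]
      push_cast
      ring

theorem pv_walk_nil (dx dy x y : Int) (fuel : Nat)
    (hin : ¬(0 ≤ x ∧ x ≤ 7 ∧ 0 ≤ y ∧ y ≤ 7)) : pvWalk dx dy x y fuel = [] := by
  cases fuel with
  | zero => simp [pvWalk]
  | succ f => simp [pvWalk, if_neg hin]

theorem pv_dir_eq (dx dy x0 y0 : Int) (hne : ¬(dx = 0 ∧ dy = 0)) :
    (pvWalk dx dy x0 y0 64).dropLast = pvDirMoves dx dy x0 y0 := by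
  by_cases hin : 0 ≤ x0 ∧ x0 ≤ 7 ∧ 0 ≤ y0 ∧ y0 ≤ 7
  · obtain ⟨m, hmin⟩ : ∃ m, PySem.List.min? (pvBounds dx dy x0 y0) (fun b => b) = some m := by
      cases hm : PySem.List.min? (pvBounds dx dy x0 y0) (fun b => b) with
      | none =>
        rw [PySem.List.min?_eq_none_iff] at hm
        exact absurd hm (pv_bounds_ne_nil dx dy x0 y0 hne)
      | some m => exact ⟨m, rfl⟩
    have hmem := PySem.List.min?_mem hmin
    have hm1 : 1 ≤ m := pv_bounds_ge1 dx dy x0 y0 hin m hmem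
    have hm8 : m ≤ 8 := pv_bounds_le8 dx dy x0 y0 hin m hmem
    have hle : ∀ b ∈ pvBounds dx dy x0 y0, m ≤ b := PySem.List.min?_isMin hmin
    have hwalk := pv_walk_eq_range dx dy m.toNat 64 x0 y0 (by omega)
      (fun k hk => pv_bounds_good dx dy x0 y0 (k : Int) hin (by omega)
        (fun b hb => by have := hle b hb; omega))
      (by
        have hcast : ((m.toNat : Nat) : Int) = m := by omega
        rw [hcast]
        exact pv_bounds_bad dx dy x0 y0 m hmem)
    rw [hwalk, pvDirMoves, if_pos hin]
    simp only [hmin, PySem.List.pyRange_one]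
    have hsplit : m.toNat = (m - 1 - 0).toNat + 1 := by omega
    rw [hsplit, List.range_succ, List.map_append]
    simp only [List.map_singleton, List.dropLast_concat, List.map_map]
    apply List.map_congr_left
    intro k _
    simp [Function.comp]
  · rw [pv_walk_nil dx dy x0 y0 64 hin, pvDirMoves, if_neg hin]
    rfl

theorem pv_fold_eq (origin : Int) :
    ∀ (dirs : List (List Int)) (acc : List Int),
    (∀ d ∈ dirs, d = [(0 : Int), 0] → (origin < 0 ∨ 63 < origin)) →
    dirs.foldl (fun moves d =>
      match d with
      | [dx, dy] =>
        let newMoves := pvWalk dx dy (PySem.Int.floordiv origin 8 + dx) (PySem.Int.mod origin 8 + dy) 64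
        moves ++ newMoves.dropLast
      | _ => moves) acc
    = dirs.foldl (fun moves d =>
      match d with
      | [] => moves
      | [_] => moves
      | dx :: dy :: rest => if rest = [] then moves ++ pvDirMoves dx dy (PySem.Int.floordiv origin 8 + dx) (PySem.Int.mod origin 8 + dy) else moves) acc := by
  intro dirs
  induction dirs with
  | nil => intro acc _; rfl
  | cons d rest ih =>
    intro acc hcond
    have hrest : ∀ d' ∈ rest, d' = [(0 : Int), 0] → (origin < 0 ∨ 63 < origin) :=
      fun d' hd' => hcond d' (List.mem_cons_of_mem _ hd')
    rw [List.foldl_cons, List.foldl_cons]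
    match d, hcond with
    | [], _ => exact ih acc hrest
    | [_], _ => exact ih acc hrest
    | _ :: _ :: _ :: _, _ => exact ih acc hrest
    | [dx, dy], hcond =>
      have hdir : (pvWalk dx dy (PySem.Int.floordiv origin 8 + dx) (PySem.Int.mod origin 8 + dy) 64).dropLast
          = pvDirMoves dx dy (PySem.Int.floordiv origin 8 + dx) (PySem.Int.mod origin 8 + dy) := by
        by_cases hne : dx = 0 ∧ dy = 0
        · obtain ⟨rfl, rfl⟩ := hne
          have hout : origin < 0 ∨ 63 < origin := hcond _ (List.mem_cons_self) rfl
          have hin : ¬(0 ≤ PySem.Int.floordiv origin 8 + 0 ∧ PySem.Int.floordiv origin 8 + 0 ≤ 7 ∧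
              0 ≤ PySem.Int.mod origin 8 + 0 ∧ PySem.Int.mod origin 8 + 0 ≤ 7) := by
            intro hc
            rcases hout with h | h
            · have : PySem.Int.floordiv origin 8 < 0 := by
                rw [PySem.Int.floordiv_lt_iff_lt_mul (by norm_num : (0:Int) < 8)]; omega
              omega
            · have : ¬ PySem.Int.floordiv origin 8 < 8 := by
                rw [PySem.Int.floordiv_lt_iff_lt_mul (by norm_num : (0:Int) < 8)]; omega
              omega
          rw [pv_walk_nil _ _ _ _ _ hin, pvDirMoves, if_neg hin]
          rfl
        · exact pv_dir_eq dx dy _ _ hne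
      refine Eq.trans (ih _ hrest) ?_
      show List.foldl _ (acc ++ (pvWalk dx dy (PySem.Int.floordiv origin 8 + dx) (PySem.Int.mod origin 8 + dy) 64).dropLast) rest
        = List.foldl _ (acc ++ pvDirMoves dx dy (PySem.Int.floordiv origin 8 + dx) (PySem.Int.mod origin 8 + dy)) rest
      rw [hdir]

-- ===== VERDICT (by name: the statement is the Claim_ definition above) =====
theorem generate_blockers_spec : Claim_equal_generate_blockers := by
  intro origin directions _ hpre
  unfold Spec_generate_blockers
  show generate_blockers origin directions = generate_blockers_alt origin directions
  have hcond : ∀ d ∈ directions, d = [(0 : Int), 0] → (origin < 0 ∨ 63 < origin) := by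
    intro d hd heq
    by_contra hc
    push_neg at hc
    exact hpre.2 hc.1 hc.2 (heq ▸ hd)
  exact pv_fold_eq origin directions [] hcond
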